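-- pv_equiv track=rewrite | github.com/cliu268/playground | adv-hw1.py | q7
-- ===== SOURCE A (Python) =====
-- def q7(d1, d2):
--     ans={}
--     for x in d1:
--         if x in d2:
--             ans[x] = d1[x]*d2[x]
--         else:
--             ans[x] = d1[x]
--     for y in d2:
--         if y not in d1:
--             ans[y] = d2[y]
--     return(ans)
-- ===== SOURCE B (Python) =====
-- def q7(d1, d2):
--     ans = {}
--     for k, v in list(d1.items()) + list(d2.items()):
--         ans[k] = ans.get(k, 1) * v
--     return ans
-- ===== Notes on version B (the rewrite author's own statement) =====
-- stated objective: simpler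
-- what changed: Replaces A's two filtered passes with membership tests against d1/d2 by a single multiply-accumulate fold over the concatenation of both item lists, seeding each key with the multiplicative identity 1 so no branching on key origin is needed.
import Mathlib
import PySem

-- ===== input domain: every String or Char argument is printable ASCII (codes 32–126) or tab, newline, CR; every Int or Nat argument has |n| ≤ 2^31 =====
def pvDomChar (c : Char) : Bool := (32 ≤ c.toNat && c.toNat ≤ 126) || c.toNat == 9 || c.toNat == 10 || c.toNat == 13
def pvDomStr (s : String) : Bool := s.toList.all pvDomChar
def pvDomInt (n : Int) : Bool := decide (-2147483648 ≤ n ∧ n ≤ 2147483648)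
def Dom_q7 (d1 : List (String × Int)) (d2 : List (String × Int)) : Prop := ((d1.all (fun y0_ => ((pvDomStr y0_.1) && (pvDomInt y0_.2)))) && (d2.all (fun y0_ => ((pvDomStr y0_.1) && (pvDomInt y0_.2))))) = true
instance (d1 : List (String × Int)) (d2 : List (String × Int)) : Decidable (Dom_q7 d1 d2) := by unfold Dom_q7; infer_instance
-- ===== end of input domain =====

-- B replaces A's two filtered passes by one uniform multiply-accumulate fold over the
-- concatenation of both item lists, seeded with the multiplicative identity 1 (simpler).


-- ===== PORT A =====
-- for x in d1: ans[x] = d1[x]*d2[x] if x in d2 else d1[x]; for y in d2: if y not in d1: ans[y] = d2[y]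
def q7 (d1 : List (String × Int)) (d2 : List (String × Int)) : List (String × Int) :=
  let D1 : PySem.Dict String Int := PySem.Dict.mk d1
  let D2 : PySem.Dict String Int := PySem.Dict.mk d2
  let ans : PySem.Dict String Int := PySem.Dict.empty
  let ans := d1.foldl (fun ans x =>
      if D2.contains x.1 then
        ans.insert x.1 (D1.getD x.1 0 * D2.getD x.1 0)
      else
        ans.insert x.1 (D1.getD x.1 0)) ans
  let ans := d2.foldl (fun ans y =>
      if !(D1.contains y.1) then ans.insert y.1 (D2.getD y.1 0) else ans) ans
  ans.items

-- ===== PORT B =====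
-- ans = {}; for k, v in list(d1.items()) + list(d2.items()): ans[k] = ans.get(k, 1) * v
def q7_alt (d1 : List (String × Int)) (d2 : List (String × Int)) : List (String × Int) :=
  ((d1 ++ d2).foldl (fun ans (p : String × Int) =>
      ans.insert p.1 (ans.getD p.1 1 * p.2)) (PySem.Dict.empty : PySem.Dict String Int)).items

-- ===== PRECONDITION & SPEC =====
-- Pre_ restricts the association lists to distinct keys: that is the canonical encoding of a
-- Python dict (a dict cannot contain a key twice), so no input actually arising from A's dict
-- arguments is excluded.
def Pre_q7 (d1 : List (String × Int)) (d2 : List (String × Int)) : Prop :=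
  (d1.map Prod.fst).Nodup ∧ (d2.map Prod.fst).Nodup
instance (d1 : List (String × Int)) (d2 : List (String × Int)) : Decidable (Pre_q7 d1 d2) := by unfold Pre_q7; infer_instance

def pvWitness_q7 : (List (String × Int)) × (List (String × Int)) :=
  ([("a", 2), ("b", 3)], [("b", 5), ("c", 7)])

def Spec_q7 (d1 : List (String × Int)) (d2 : List (String × Int)) (out : List (String × Int)) : Prop := out = q7_alt d1 d2
instance (d1 : List (String × Int)) (d2 : List (String × Int)) (out : List (String × Int)) : Decidable (Spec_q7 d1 d2 out) := by unfold Spec_q7; infer_instance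

-- ===== CLAIM (what is proved, stated in full; the proofs are below) =====
def Claim_equal_q7 : Prop := ∀ (d1 : List (String × Int)) (d2 : List (String × Int)), Dom_q7 d1 d2 → Pre_q7 d1 d2 → Spec_q7 d1 d2 (q7 d1 d2)

-- ===== LEMMAS AND PROOFS =====

-- the merging function both programs realise on the d1 part
def pvMerge (D2 : PySem.Dict String Int) (p : String × Int) : String × Int :=
  if D2.contains p.1 then (p.1, p.2 * D2.getD p.1 0) else p

-- A's first loop: every key of d1 is fresh in ans, so the inserts append in order.
theorem pv_foldA1 (D1 D2 : PySem.Dict String Int) :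
    ∀ (l : List (String × Int)) (acc : PySem.Dict String Int),
      (l.map Prod.fst).Nodup →
      (∀ p ∈ l, acc.contains p.1 = false) →
      (l.foldl (fun ans x =>
          if D2.contains x.1 then ans.insert x.1 (D1.getD x.1 0 * D2.getD x.1 0)
          else ans.insert x.1 (D1.getD x.1 0)) acc).items
        = acc.items ++ l.map (fun x => (x.1,
            if D2.contains x.1 then D1.getD x.1 0 * D2.getD x.1 0 else D1.getD x.1 0)) := by
  intro l
  induction l with
  | nil => intro acc _ _; simp
  | cons p l ih =>
    intro acc hnd hfr
    simp only [List.map_cons, List.nodup_cons] at hnd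
    have hap : acc.contains p.1 = false := hfr p (by simp)
    have hstep : (if D2.contains p.1 then acc.insert p.1 (D1.getD p.1 0 * D2.getD p.1 0)
        else acc.insert p.1 (D1.getD p.1 0))
        = acc.insert p.1
            (if D2.contains p.1 then D1.getD p.1 0 * D2.getD p.1 0 else D1.getD p.1 0) := by
      split_ifs <;> rfl
    rw [List.foldl_cons, hstep, ih _ hnd.2 ?_,
      PySem.Dict.items_insert_of_not_contains _ _ hap]
    · simp
    · intro q hq
      have hne : q.1 ≠ p.1 := fun he => hnd.1 (he ▸ List.mem_map_of_mem hq)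
      rw [PySem.Dict.contains_insert]
      simp [hne, hfr q (by simp [hq])]

-- membership after A's first loop: a key is present iff it was, or it occurs in l
theorem pv_foldA1_contains (D1 D2 : PySem.Dict String Int) :
    ∀ (l : List (String × Int)) (acc : PySem.Dict String Int) (k : String),
      (l.foldl (fun ans x =>
          if D2.contains x.1 then ans.insert x.1 (D1.getD x.1 0 * D2.getD x.1 0)
          else ans.insert x.1 (D1.getD x.1 0)) acc).contains k
        = (acc.contains k || l.any (fun x => k == x.1)) := by
  intro l
  induction l with
  | nil => intro acc k; simp
  | cons p l ih =>
    intro acc k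
    have hstep : (if D2.contains p.1 then acc.insert p.1 (D1.getD p.1 0 * D2.getD p.1 0)
        else acc.insert p.1 (D1.getD p.1 0))
        = acc.insert p.1
            (if D2.contains p.1 then D1.getD p.1 0 * D2.getD p.1 0 else D1.getD p.1 0) := by
      split_ifs <;> rfl
    rw [List.foldl_cons, hstep, ih, PySem.Dict.contains_insert, List.any_cons]
    cases h1 : (k == p.1) <;> cases h2 : acc.contains k <;> simp

-- A's second loop: keys of d2 that are not in D1 are fresh, so the inserts append.
theorem pv_foldA2 (D1 D2 : PySem.Dict String Int) :
    ∀ (l : List (String × Int)) (acc : PySem.Dict String Int),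
      (l.map Prod.fst).Nodup →
      (∀ p ∈ l, D1.contains p.1 = false → acc.contains p.1 = false) →
      (l.foldl (fun ans y =>
          if !(D1.contains y.1) then ans.insert y.1 (D2.getD y.1 0) else ans) acc).items
        = acc.items ++ (l.filter (fun y => !(D1.contains y.1))).map
            (fun y => (y.1, D2.getD y.1 0)) := by
  intro l
  induction l with
  | nil => intro acc _ _; simp
  | cons p l ih =>
    intro acc hnd hfresh
    simp only [List.map_cons, List.nodup_cons] at hnd
    by_cases hc : D1.contains p.1 = true
    · have hstep : (if !(D1.contains p.1) then acc.insert p.1 (D2.getD p.1 0) else acc)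
          = acc := by simp [hc]
      have hflt : List.filter (fun y => !(D1.contains y.1)) (p :: l)
          = List.filter (fun y => !(D1.contains y.1)) l := by
        simp [hc]
      rw [List.foldl_cons, hstep, hflt, ih acc hnd.2 (fun q hq h => hfresh q (by simp [hq]) h)]
    · simp only [Bool.not_eq_true] at hc
      have hap : acc.contains p.1 = false := hfresh p (by simp) hc
      have hstep : (if !(D1.contains p.1) then acc.insert p.1 (D2.getD p.1 0) else acc)
          = acc.insert p.1 (D2.getD p.1 0) := by simp [hc]
      have hflt : List.filter (fun y => !(D1.contains y.1)) (p :: l)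
          = p :: List.filter (fun y => !(D1.contains y.1)) l := by
        simp [hc]
      rw [List.foldl_cons, hstep, hflt,
        ih (acc.insert p.1 (D2.getD p.1 0)) hnd.2 ?_,
        PySem.Dict.items_insert_of_not_contains _ _ hap]
      · simp
      · intro q hq h
        have hne : q.1 ≠ p.1 := fun he => hnd.1 (he ▸ List.mem_map_of_mem hq)
        rw [PySem.Dict.contains_insert]
        simp [hne, hfresh q (by simp [hq]) h]

-- B's fold: a key already in the accumulator is multiplied in place; a fresh key appends
-- with value 1 * v (the identity seed).
theorem pv_foldB :
    ∀ (l : List (String × Int)) (acc : PySem.Dict String Int),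
      acc.keys.Nodup →
      (l.map Prod.fst).Nodup →
      (l.foldl (fun ans p => ans.insert p.1 (ans.getD p.1 1 * p.2)) acc).items
        = acc.items.map (pvMerge (PySem.Dict.mk l))
            ++ (l.filter (fun p => !(acc.contains p.1))).map (fun p => (p.1, 1 * p.2)) := by
  intro l
  induction l with
  | nil =>
    intro acc _ _
    have hm : ∀ q ∈ acc.items, pvMerge (PySem.Dict.mk []) q = q := by
      intro q _
      simp [pvMerge, PySem.Dict.contains_mk]
    simp [List.map_congr_left hm]
  | cons p l ih =>
    intro acc hka hnd
    simp only [List.map_cons, List.nodup_cons] at hnd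
    have hcontains_items : ∀ q ∈ acc.items, acc.contains q.1 = true := by
      intro q hq
      have hk : q.1 ∈ acc.keys := by
        simp only [PySem.Dict.keys]
        exact List.mem_map_of_mem hq
      exact (PySem.Dict.contains_iff_mem_keys acc q.1).mpr hk
    have hmap : ∀ q : String × Int, q.1 ≠ p.1 →
        pvMerge (PySem.Dict.mk (p :: l)) q = pvMerge (PySem.Dict.mk l) q := by
      intro q hne
      have hbe : (p.1 == q.1) = false := by simp [Ne.symm hne]
      have hget : ∀ x, ({ items := p :: l } : PySem.Dict String Int).get? x
          = if (p.1 == x) then some p.2 else ({ items := l } : PySem.Dict String Int).get? x :=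
        fun x => PySem.Dict.get?_mk_cons p.1 p.2 l x
      simp only [pvMerge, PySem.Dict.contains_mk, PySem.Dict.getD_eq_get?_getD,
        List.any_cons, hget, hbe, Bool.false_or, Bool.false_eq_true]
      simp
    by_cases hc : acc.contains p.1 = true
    · -- key already present: overwrite in place with acc[p.1] * p.2
      have hflt : List.filter (fun q => !(acc.contains q.1)) (p :: l)
          = List.filter (fun q => !(acc.contains q.1)) l := by
        simp [hc]
      have hka' : (acc.insert p.1 (acc.getD p.1 1 * p.2)).keys.Nodup := by
        rw [PySem.Dict.keys_insert_of_contains _ _ hc]; exact hka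
      rw [List.foldl_cons, hflt, ih (acc.insert p.1 (acc.getD p.1 1 * p.2)) hka' hnd.2,
        PySem.Dict.items_insert_of_contains _ _ hc, List.map_map]
      congr 1
      · -- the two maps agree pointwise on acc.items
        apply List.map_congr_left
        intro q hq
        by_cases hqe : q.1 = p.1
        · have hv : acc.getD p.1 1 = q.2 := by
            have hmem : (p.1, q.2) ∈ acc.items := by rw [← hqe]; exact hq
            exact PySem.Dict.getD_of_mem_items _ hmem hka 1
          have hL : pvMerge (PySem.Dict.mk l)
                (if (q.1 == p.1) then (p.1, acc.getD p.1 1 * p.2) else q)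
              = (p.1, acc.getD p.1 1 * p.2) := by
            have hq1 : (q.1 == p.1) = true := by simp [hqe]
            rw [hq1]
            have hnotin : ¬ (p.1 ∈ l.map Prod.fst) := hnd.1
            simp only [if_true, pvMerge, PySem.Dict.contains_mk]
            rw [if_neg (by simpa using hnotin)]
          have hR : pvMerge (PySem.Dict.mk (p :: l)) q = (q.1, q.2 * p.2) := by
            have hbe : (p.1 == q.1) = true := by simp [hqe]
            have hget : ∀ x, ({ items := p :: l } : PySem.Dict String Int).get? x
                = if (p.1 == x) then some p.2 else ({ items := l } : PySem.Dict String Int).get? x :=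
              fun x => PySem.Dict.get?_mk_cons p.1 p.2 l x
            simp [pvMerge, PySem.Dict.contains_mk, PySem.Dict.getD_eq_get?_getD,
              List.any_cons, hget, hbe]
          simp only [Function.comp]
          rw [hL, hR, hqe, hv]
        · have hq1 : (q.1 == p.1) = false := by simp [hqe]
          simp only [Function.comp, hq1]
          exact (hmap q hqe).symm
      · -- filters agree
        apply congrArg
        apply List.filter_congr
        intro q hq
        have hne : q.1 ≠ p.1 := fun he => hnd.1 (he ▸ List.mem_map_of_mem hq)
        rw [PySem.Dict.contains_insert]
        simp [hne]
    · simp only [Bool.not_eq_true] at hc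
      have hg : acc.getD p.1 1 = 1 := by simp [PySem.Dict.getD_of_not_contains, hc]
      have hflt : List.filter (fun q => !(acc.contains q.1)) (p :: l)
          = p :: List.filter (fun q => !(acc.contains q.1)) l := by
        simp [hc]
      have hpk : p.1 ∉ acc.keys := fun hm => by
        have := (PySem.Dict.contains_iff_mem_keys acc p.1).mpr hm
        rw [this] at hc; cases hc
      have hka' : (acc.insert p.1 (acc.getD p.1 1 * p.2)).keys.Nodup := by
        rw [PySem.Dict.keys_insert_of_not_contains _ _ hc]
        simp only [List.nodup_append, List.nodup_cons, List.not_mem_nil, not_false_iff,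
          List.nodup_nil, and_true, true_and]
        exact ⟨hka, by intro a ha b hb; simp only [List.mem_cons, List.not_mem_nil,
          or_false] at hb; subst hb; exact fun he => hpk (he ▸ ha)⟩
      rw [List.foldl_cons, hflt, ih (acc.insert p.1 (acc.getD p.1 1 * p.2)) hka' hnd.2,
        PySem.Dict.items_insert_of_not_contains _ _ hc, List.map_append]
      have h1 : acc.items.map (pvMerge (PySem.Dict.mk l))
          = acc.items.map (pvMerge (PySem.Dict.mk (p :: l))) := by
        apply List.map_congr_left
        intro q hq
        have hne : q.1 ≠ p.1 := by
          intro he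
          have := hcontains_items q hq
          rw [he] at this; rw [this] at hc; cases hc
        exact (hmap q hne).symm
      have hpl : pvMerge (PySem.Dict.mk l) (p.1, acc.getD p.1 1 * p.2)
          = (p.1, 1 * p.2) := by
        have hnotin : ¬ (p.1 ∈ l.map Prod.fst) := hnd.1
        simp only [pvMerge, PySem.Dict.contains_mk]
        rw [if_neg (by simpa using hnotin), hg]
      have h3 : l.filter (fun q => !((acc.insert p.1 (acc.getD p.1 1 * p.2)).contains q.1))
          = l.filter (fun q => !(acc.contains q.1)) := by
        apply List.filter_congr
        intro q hq
        have hne : q.1 ≠ p.1 := fun he => hnd.1 (he ▸ List.mem_map_of_mem hq)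
        rw [PySem.Dict.contains_insert]
        simp [hne]
      rw [h1, h3]
      simp [hpl]

-- the first half of B's fold (over d1, from the empty dict) rebuilds exactly d1
theorem pv_foldB_phase1 (d1 : List (String × Int)) (h1 : (d1.map Prod.fst).Nodup) :
    d1.foldl (fun ans p => ans.insert p.1 (ans.getD p.1 1 * p.2))
        (PySem.Dict.empty : PySem.Dict String Int)
      = PySem.Dict.mk d1 := by
  apply PySem.Dict.ext
  rw [pv_foldB d1 PySem.Dict.empty (by simp [PySem.Dict.keys]; exact List.nodup_nil) h1]
  have hflt : d1.filter (fun p => !((PySem.Dict.empty : PySem.Dict String Int).contains p.1))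
      = d1 := by
    apply List.filter_eq_self.mpr
    intro p _
    simp [PySem.Dict.contains_empty]
  have hemp : (PySem.Dict.empty : PySem.Dict String Int).items = ([] : List (String × Int)) := rfl
  rw [hemp, hflt]
  simp only [List.map_nil, List.nil_append]
  have : ∀ p ∈ d1, ((fun p : String × Int => (p.1, 1 * p.2)) p) = p := by
    intro p _; simp
  rw [List.map_congr_left this]
  simp

-- ===== VERDICT (by name: the statement is the Claim_ definition above) =====
theorem q7_spec : Claim_equal_q7 := by
  intro d1 d2 _ hpre
  obtain ⟨h1, h2⟩ := hpre
  have hkeys1 : (PySem.Dict.mk d1).keys.Nodup := by simpa [PySem.Dict.keys_mk] using h1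
  have hkeys2 : (PySem.Dict.mk d2).keys.Nodup := by simpa [PySem.Dict.keys_mk] using h2
  show q7 d1 d2 = q7_alt d1 d2
  simp only [q7, q7_alt]
  have hfresh : ∀ p ∈ d2, (PySem.Dict.mk d1).contains p.1 = false →
      (d1.foldl (fun ans x =>
          if (PySem.Dict.mk d2).contains x.1 then
            ans.insert x.1 ((PySem.Dict.mk d1).getD x.1 0 * (PySem.Dict.mk d2).getD x.1 0)
          else ans.insert x.1 ((PySem.Dict.mk d1).getD x.1 0)) PySem.Dict.empty).contains p.1
        = false := by
    intro p _ h
    rw [pv_foldA1_contains]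
    rw [PySem.Dict.contains_mk] at h
    simp only [PySem.Dict.contains_empty, Bool.false_or]
    simp only [List.any_eq_false] at h ⊢
    intro x hx
    have hx1 := h x hx
    simp only [beq_iff_eq] at hx1 ⊢
    exact fun he => hx1 he.symm
  rw [List.foldl_append, pv_foldB_phase1 d1 h1,
    pv_foldA2 (PySem.Dict.mk d1) (PySem.Dict.mk d2) d2 _ h2 hfresh,
    pv_foldA1 (PySem.Dict.mk d1) (PySem.Dict.mk d2) d1 PySem.Dict.empty h1
      (fun p _ => PySem.Dict.contains_empty p.1),
    pv_foldB d2 (PySem.Dict.mk d1) hkeys1 h2]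
  have hItems : (PySem.Dict.mk d1).items = d1 := rfl
  rw [hItems]
  congr 1
  · -- the d1 part
    have hemp : (PySem.Dict.empty : PySem.Dict String Int).items = ([] : List (String × Int)) := rfl
    rw [hemp, List.nil_append]
    apply List.map_congr_left
    intro x hx
    have hmem : (x.1, x.2) ∈ (PySem.Dict.mk d1).items := hx
    have hgd1 : (PySem.Dict.mk d1).getD x.1 0 = x.2 :=
      PySem.Dict.getD_of_mem_items _ hmem hkeys1 0
    rw [hgd1]
    simp only [pvMerge]
    split_ifs <;> rfl
  · -- the appended d2-only part
    apply List.map_congr_left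
    intro y hy
    have hyd2 : y ∈ d2 := List.mem_of_mem_filter hy
    have hmem : (y.1, y.2) ∈ (PySem.Dict.mk d2).items := hyd2
    have : (PySem.Dict.mk d2).getD y.1 0 = y.2 :=
      PySem.Dict.getD_of_mem_items _ hmem hkeys2 0
    rw [this]
    simp
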